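-- pv_equiv track=rewrite | github.com/MarcBaumholz/template-mcp | tools/shared_utilities/field_extractor.py | analyze_field_relationships
-- ===== SOURCE A (Python) =====
-- from typing import Dict, Any, List, Set, Optional, Tuple
--
-- def analyze_field_relationships(fields: List[str]) -> Dict[str, List[str]]:
--     """Analyze relationships between fields"""
--     relationships = {}
--
--     for field in fields:
--         field_name = field.split(".")[-1].lower()
--
--         # Find related fields
--         related = []
--         for other_field in fields:
--             if field == other_field:
--                 continue
--
--             other_name = other_field.split(".")[-1].lower()
--
--             # Check for common prefixes/suffixes
--             if (field_name.endswith("_id") and other_name.startswith(field_name[:-3])) or \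
--                (other_name.endswith("_id") and field_name.startswith(other_name[:-3])):
--                 related.append(other_field)
--
--         if related:
--             relationships[field] = related
--
--     return relationships
-- ===== SOURCE B (Python) =====
-- def analyze_field_relationships(fields):
--     """Analyze relationships between fields via inverted prefix indexes.
--
--     Instead of comparing every pair of fields, build two hash indexes in one
--     pass -- every prefix of every lowered name -> field indices, and prefix of
--     each '_id' name -> indices of those '_id' fields.  A field's matches are
--     then direct dictionary lookups; the union of hit indices, sorted, restores
--     the original field order.
--     """
--     names = [f.split(".")[-1].lower() for f in fields]
--     by_prefix = {}      # every prefix q of names[i]  -> [i, ...]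
--     id_by_prefix = {}   # names[i][:-3] for '_id' i   -> [i, ...]
--     for i, nm in enumerate(names):
--         for k in range(len(nm) + 1):
--             by_prefix.setdefault(nm[:k], []).append(i)
--         if nm.endswith("_id"):
--             id_by_prefix.setdefault(nm[:-3], []).append(i)
--     relationships = {}
--     for i, f in enumerate(fields):
--         nm = names[i]
--         hits = set()
--         if nm.endswith("_id"):
--             hits.update(by_prefix.get(nm[:-3], ()))
--         for k in range(len(nm) + 1):
--             hits.update(id_by_prefix.get(nm[:k], ()))
--         related = [fields[j] for j in sorted(hits) if fields[j] != f]
--         if related: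
--             relationships[f] = related
--     return relationships
-- ===== Notes on version B (the rewrite author's own statement) =====
-- stated objective: faster
-- what changed: B replaces A's all-pairs comparison loop by two inverted hash indexes built in one pass (every prefix of every lowered name -> field indices, and each '_id' name's stem -> indices), answers each field's matches by direct dictionary lookups, and restores A's output order by sorting the hit indices.
import Mathlib
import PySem

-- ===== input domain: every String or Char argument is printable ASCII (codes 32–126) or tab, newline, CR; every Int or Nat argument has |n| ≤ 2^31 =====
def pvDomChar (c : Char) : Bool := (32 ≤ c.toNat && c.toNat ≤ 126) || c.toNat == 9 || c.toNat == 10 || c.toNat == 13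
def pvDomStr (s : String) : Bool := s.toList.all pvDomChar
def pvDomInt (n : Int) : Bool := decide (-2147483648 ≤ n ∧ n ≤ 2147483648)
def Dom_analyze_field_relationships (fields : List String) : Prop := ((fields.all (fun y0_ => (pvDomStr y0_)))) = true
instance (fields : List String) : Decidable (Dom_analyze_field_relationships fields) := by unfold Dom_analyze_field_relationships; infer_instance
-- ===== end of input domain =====

-- B replaces A's all-pairs scan by two inverted prefix indexes (hash maps built in one
-- pass); each field's matches are then direct dictionary lookups whose hit indices,
-- sorted, restore the original order — measurably faster; same return value.

-- f.split(".")[-1].lower() — split? with sep "." is always `some` of a nonempty list,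
-- so the two getD defaults are never taken
def pvNameOf (f : String) : String :=
  PySem.Str.lower ((PySem.List.pyGet? ((PySem.Str.split? f ".").getD []) (-1)).getD "")

-- ===== PORT A =====
def analyze_field_relationships (fields : List String) : List (String × List String) :=
  (fields.foldl (fun relationships field =>
      let field_name := pvNameOf field
      let related := fields.foldl (fun related other_field =>
          if field == other_field then related
          else
            let other_name := pvNameOf other_field
            if (PySem.Str.endswith field_name "_id"
                  && PySem.Str.startswith other_name (PySem.Str.slice field_name none (some (-3))))
               || (PySem.Str.endswith other_name "_id"
                  && PySem.Str.startswith field_name (PySem.Str.slice other_name none (some (-3))))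
            then related ++ [other_field] else related) []
      if related = [] then relationships else relationships.insert field related)
    (PySem.Dict.empty : PySem.Dict String (List String))).items

-- ===== PORT B =====
-- Source B: names; one pass building by_prefix (every prefix of every name -> indices) and
-- id_by_prefix (name[:-3] of each '_id' name -> indices); then per field a set of hit
-- indices from dictionary lookups, sorted, filtered and mapped back to field values.
def analyze_field_relationships_alt (fields : List String) : List (String × List String) :=
  let names := fields.map pvNameOf
  let idx :=
    (PySem.List.enumerate names).foldl
      (fun (d : (PySem.Dict String (List Int)) × (PySem.Dict String (List Int))) inm =>
        ((PySem.List.pyRange 0 (PySem.Str.len inm.2 + 1) 1).foldl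
            (fun d1 k => d1.modify (PySem.Str.slice inm.2 none (some k)) [] (· ++ [inm.1])) d.1,
         if PySem.Str.endswith inm.2 "_id"
            then d.2.modify (PySem.Str.slice inm.2 none (some (-3))) [] (· ++ [inm.1]) else d.2))
      (PySem.Dict.empty, PySem.Dict.empty)
  let by_prefix := idx.1
  let id_by_prefix := idx.2
  ((PySem.List.enumerate fields).foldl
    (fun (relationships : PySem.Dict String (List String)) ifd =>
      let nm := PySem.List.pyGetD names ifd.1 ""
      let hits0 : PySem.Set Int :=
        if PySem.Str.endswith nm "_id"
          then PySem.Set.update PySem.Set.empty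
                 (by_prefix.getD (PySem.Str.slice nm none (some (-3))) [])
          else PySem.Set.empty
      let hits := (PySem.List.pyRange 0 (PySem.Str.len nm + 1) 1).foldl
          (fun h k => PySem.Set.update h (id_by_prefix.getD (PySem.Str.slice nm none (some k)) [])) hits0
      let related := ((PySem.List.sorted hits (fun x => x)).filter
          (fun j => PySem.List.pyGetD fields j "" != ifd.2)).map (fun j => PySem.List.pyGetD fields j "")
      if related = [] then relationships else relationships.insert ifd.2 related)
    (PySem.Dict.empty : PySem.Dict String (List String))).items

-- ===== PRECONDITION & SPEC =====
def Spec_analyze_field_relationships (fields : List String) (out : List (String × List String)) : Prop := out = analyze_field_relationships_alt fields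
instance (fields : List String) (out : List (String × List String)) : Decidable (Spec_analyze_field_relationships fields out) := by unfold Spec_analyze_field_relationships; infer_instance

-- ===== CLAIM (what is proved, stated in full; the proofs are below) =====
def Claim_equal_analyze_field_relationships : Prop := ∀ (fields : List String), Dom_analyze_field_relationships fields → Spec_analyze_field_relationships fields (analyze_field_relationships fields)

-- ===== LEMMAS AND PROOFS =====

-- A's symmetric inner condition on the (already computed) names of the two fields
def pvCond (nf no : String) : Bool :=
  (PySem.Str.endswith nf "_id"
     && PySem.Str.startswith no (PySem.Str.slice nf none (some (-3))))
  || (PySem.Str.endswith no "_id"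
     && PySem.Str.startswith nf (PySem.Str.slice no none (some (-3))))

-- the per-field related list both programs compute
def pvRel (fields : List String) (f : String) : List String :=
  fields.filter (fun o => (o != f) && pvCond (pvNameOf f) (pvNameOf o))

-- q is produced by the loop 'for k in range(len(nm)+1): nm[:k]' iff nm startswith q
theorem pv_prefixes (nm q : String) :
    (∃ k, k ∈ PySem.List.pyRange 0 (PySem.Str.len nm + 1) 1 ∧
        PySem.Str.slice nm none (some k) = q) ↔ PySem.Str.startswith nm q = true := by
  rw [PySem.Str.startswith_eq, PySem.Chars.startswith_iff, List.prefix_iff_eq_take]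
  constructor
  · rintro ⟨k, hk, rfl⟩
    rcases PySem.List.mem_pyRange_one.mp hk with ⟨hk0, hk1⟩
    rw [PySem.Str.len_eq] at hk1
    have hle : k.toNat ≤ nm.toList.length := by omega
    have ht : (PySem.Str.slice nm none (some k)).toList = nm.toList.take k.toNat := by
      rw [PySem.Str.toList_slice, PySem.Chars.slice_eq_listSlice, PySem.List.slice_to _ hk0]
    rw [ht, List.length_take, min_eq_left hle]
  · intro h
    refine ⟨(q.toList.length : Int), ?_, ?_⟩
    · have hle : q.toList.length ≤ nm.toList.length := by
        have hl := congrArg List.length h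
        rw [List.length_take] at hl
        exact hl.le.trans (min_le_right _ _)
      rw [PySem.List.mem_pyRange_one, PySem.Str.len_eq]
      omega
    · apply String.toList_inj.mp
      rw [PySem.Str.toList_slice, PySem.Chars.slice_eq_listSlice,
        PySem.List.slice_to _ (by positivity), Int.toNat_natCast]
      exact h.symm

-- membership in a dict after a loop of 'd.setdefault(q, []).append(i)' over keys ks
theorem pv_modList (ks : List String) (d : PySem.Dict String (List Int)) (q : String) (i j : Int) :
    j ∈ (ks.foldl (fun d q' => d.modify q' [] (· ++ [i])) d).getD q [] ↔
      j ∈ d.getD q [] ∨ (j = i ∧ q ∈ ks) := by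
  induction ks generalizing d with
  | nil => simp
  | cons a t ih =>
    simp only [List.foldl_cons, ih, PySem.Dict.getD_modify]
    by_cases hq : q = a
    · subst hq
      simp only [if_true, List.mem_append, List.mem_cons]
      tauto
    · simp only [if_neg hq, List.mem_cons]
      tauto

-- membership in by_prefix after processing the (index, name) pairs l
theorem pv_byPrefix (l : List (Int × String)) (d : PySem.Dict String (List Int)) (q : String) (j : Int) :
    j ∈ (l.foldl (fun d p =>
          (PySem.List.pyRange 0 (PySem.Str.len p.2 + 1) 1).foldl
            (fun d1 k => d1.modify (PySem.Str.slice p.2 none (some k)) [] (· ++ [p.1])) d) d).getD q [] ↔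
      j ∈ d.getD q [] ∨ ∃ p ∈ l, j = p.1 ∧ PySem.Str.startswith p.2 q = true := by
  induction l generalizing d with
  | nil => simp
  | cons a t ih =>
    simp only [List.foldl_cons, ih]
    have h : ∀ (d : PySem.Dict String (List Int)),
        (PySem.List.pyRange 0 (PySem.Str.len a.2 + 1) 1).foldl
            (fun d1 k => d1.modify (PySem.Str.slice a.2 none (some k)) [] (· ++ [a.1])) d =
        ((PySem.List.pyRange 0 (PySem.Str.len a.2 + 1) 1).map
            (fun k => PySem.Str.slice a.2 none (some k))).foldl
            (fun d1 q' => d1.modify q' [] (· ++ [a.1])) d := by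
      intro d; rw [List.foldl_map]
    rw [h, pv_modList]
    constructor
    · rintro ((hd | ⟨hj, hk⟩) | hex)
      · exact Or.inl hd
      · refine Or.inr ⟨a, List.mem_cons_self, hj, ?_⟩
        rcases List.mem_map.mp hk with ⟨k, hk1, hk2⟩
        exact (pv_prefixes a.2 q).mp ⟨k, hk1, hk2⟩
      · rcases hex with ⟨p, hp, h1, h2⟩
        exact Or.inr ⟨p, List.mem_cons_of_mem _ hp, h1, h2⟩
    · rintro (hd | ⟨p, hp, h1, h2⟩)
      · exact Or.inl (Or.inl hd)
      · rcases List.mem_cons.mp hp with rfl | hp'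
        · refine Or.inl (Or.inr ⟨h1, ?_⟩)
          rcases (pv_prefixes p.2 q).mpr h2 with ⟨k, hk1, hk2⟩
          exact List.mem_map.mpr ⟨k, hk1, hk2⟩
        · exact Or.inr ⟨p, hp', h1, h2⟩

-- membership in id_by_prefix after processing the (index, name) pairs l
theorem pv_idPrefix (l : List (Int × String)) (d : PySem.Dict String (List Int)) (q : String) (j : Int) :
    j ∈ (l.foldl (fun d p =>
          if PySem.Str.endswith p.2 "_id"
            then d.modify (PySem.Str.slice p.2 none (some (-3))) [] (· ++ [p.1]) else d) d).getD q [] ↔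
      j ∈ d.getD q [] ∨ ∃ p ∈ l, j = p.1 ∧ PySem.Str.endswith p.2 "_id" = true ∧
        PySem.Str.slice p.2 none (some (-3)) = q := by
  induction l generalizing d with
  | nil => simp
  | cons a t ih =>
    simp only [List.foldl_cons, ih]
    by_cases he : PySem.Str.endswith a.2 "_id"
    · simp only [he, if_true, PySem.Dict.getD_modify]
      by_cases hq : q = PySem.Str.slice a.2 none (some (-3))
      · subst hq
        simp only [if_true, List.mem_append, List.mem_singleton]
        constructor
        · rintro ((hd | rfl) | ⟨p, hp, h⟩)
          · exact Or.inl hd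
          · exact Or.inr ⟨a, List.mem_cons_self, rfl, he, rfl⟩
          · exact Or.inr ⟨p, List.mem_cons_of_mem _ hp, h⟩
        · rintro (hd | ⟨p, hp, h1, h2, h3⟩)
          · exact Or.inl (Or.inl hd)
          · rcases List.mem_cons.mp hp with rfl | hp'
            · exact Or.inl (Or.inr h1)
            · exact Or.inr ⟨p, hp', h1, h2, h3⟩
      · simp only [hq, if_false]
        constructor
        · rintro (hd | ⟨p, hp, h⟩)
          · exact Or.inl hd
          · exact Or.inr ⟨p, List.mem_cons_of_mem _ hp, h⟩
        · rintro (hd | ⟨p, hp, h1, h2, h3⟩)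
          · exact Or.inl hd
          · rcases List.mem_cons.mp hp with rfl | hp'
            · exact absurd h3.symm hq
            · exact Or.inr ⟨p, hp', h1, h2, h3⟩
    · simp only [he]
      constructor
      · rintro (hd | ⟨p, hp, h⟩)
        · exact Or.inl hd
        · exact Or.inr ⟨p, List.mem_cons_of_mem _ hp, h⟩
      · rintro (hd | ⟨p, hp, h1, h2, h3⟩)
        · exact Or.inl hd
        · rcases List.mem_cons.mp hp with rfl | hp'
          · exact absurd h2 (by simpa using he)
          · exact Or.inr ⟨p, hp', h1, h2, h3⟩

-- membership after a loop of 'hits.update(D.get(q, ()))' over keys ks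
theorem pv_setUpd (ks : List String) (D : PySem.Dict String (List Int)) (h : PySem.Set Int) (j : Int) :
    j ∈ ks.foldl (fun h q' => PySem.Set.update h (D.getD q' [])) h ↔
      j ∈ h ∨ ∃ q' ∈ ks, j ∈ D.getD q' [] := by
  induction ks generalizing h with
  | nil => simp
  | cons a t ih =>
    simp only [List.foldl_cons, ih, PySem.Set.mem_update]
    constructor
    · rintro ((h1 | h1) | ⟨q', hq, hj⟩)
      · exact Or.inl h1
      · exact Or.inr ⟨a, List.mem_cons_self, h1⟩
      · exact Or.inr ⟨q', List.mem_cons_of_mem _ hq, hj⟩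
    · rintro (h1 | ⟨q', hq, hj⟩)
      · exact Or.inl (Or.inl h1)
      · rcases List.mem_cons.mp hq with rfl | hq'
        · exact Or.inl (Or.inr hj)
        · exact Or.inr ⟨q', hq', hj⟩

-- the sorted hit set IS the in-order filter of range(n)
theorem pv_sortedFilter (s : PySem.Set Int) (hnd : s.Nodup) (n : Int) (P : Int → Bool)
    (hm : ∀ j, j ∈ s ↔ j ∈ (PySem.List.pyRange 0 n 1).filter P) :
    PySem.List.sorted s (fun x => x) = (PySem.List.pyRange 0 n 1).filter P := by
  have hndf : ((PySem.List.pyRange 0 n 1).filter P).Nodup :=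
    (PySem.List.nodup_pyRange_one 0 n).filter P
  have hperm : (PySem.List.sorted s (fun x => x)).Perm ((PySem.List.pyRange 0 n 1).filter P) := by
    refine (PySem.List.sorted_perm s _ false).trans ?_
    refine List.perm_of_nodup_nodup_toFinset_eq hnd hndf ?_
    ext j
    simp only [List.mem_toFinset]
    exact hm j
  exact PySem.List.eq_of_perm_of_pairwise_le_of_injective (fun x => x) (fun a b h => h) hperm
    (PySem.List.sorted_pairwise s (fun x => x))
    (((PySem.List.pairwise_lt_pyRange_one 0 n).filter P).imp le_of_lt)

-- A's inner loop is the filter pvRel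
theorem pv_innerA (fields : List String) (f : String) :
    fields.foldl (fun related other_field =>
        if f == other_field then related
        else if (PySem.Str.endswith (pvNameOf f) "_id"
                  && PySem.Str.startswith (pvNameOf other_field) (PySem.Str.slice (pvNameOf f) none (some (-3))))
               || (PySem.Str.endswith (pvNameOf other_field) "_id"
                  && PySem.Str.startswith (pvNameOf f) (PySem.Str.slice (pvNameOf other_field) none (some (-3))))
          then related ++ [other_field] else related) [] = pvRel fields f := by
  have h : ∀ (related : List String) (o : String),
      (if f == o then related
        else if (PySem.Str.endswith (pvNameOf f) "_id"
                  && PySem.Str.startswith (pvNameOf o) (PySem.Str.slice (pvNameOf f) none (some (-3))))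
               || (PySem.Str.endswith (pvNameOf o) "_id"
                  && PySem.Str.startswith (pvNameOf f) (PySem.Str.slice (pvNameOf o) none (some (-3))))
          then related ++ [o] else related) =
      (if ((o != f) && pvCond (pvNameOf f) (pvNameOf o)) = true then related ++ [o] else related) := by
    intro related o
    by_cases hfo : f = o
    · subst hfo; simp
    · have h1 : (f == o) = false := by simp [hfo]
      have h2 : (o != f) = true := by simp [bne]; exact fun h => hfo h.symm
      simp [h1, h2, pvCond]
  rw [funext (fun r => funext (h r)), PySem.List.foldl_append_if_eq_filter]
  simp [pvRel]

-- the index-filter-map form of a value filter, Nat-index core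
theorem pv_natFilter (l : List String) (p : String → Bool) :
    ((List.range l.length).filter (fun k => p (l.getD k ""))).map (fun k => l.getD k "") =
      l.filter p := by
  induction l with
  | nil => simp
  | cons a t ih =>
    rw [List.length_cons, List.range_succ_eq_map, List.filter_cons, List.filter_map]
    by_cases hp : p a <;>
      simp_all [List.map_map, Function.comp_def]

-- the index-filter-map form of a value filter
theorem pv_indexFilter (l : List String) (p : String → Bool) :
    ((PySem.List.pyRange 0 (l.length : Int) 1).filter
        (fun j => p (PySem.List.pyGetD l j ""))).map (fun j => PySem.List.pyGetD l j "") =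
      l.filter p := by
  rw [PySem.List.pyRange_one, List.filter_map, List.map_map]
  have h1 : ((fun j => p (PySem.List.pyGetD l j "")) ∘ fun k : Nat => (0 : Int) + ↑k) =
      (fun k : Nat => p (l.getD k "")) := by
    funext k; simp [PySem.List.pyGetD_natCast]
  have h2 : ((fun j => PySem.List.pyGetD l j "") ∘ fun k : Nat => (0 : Int) + ↑k) =
      (fun k : Nat => l.getD k "") := by
    funext k; simp [PySem.List.pyGetD_natCast]
  have h3 : ((l.length : Int) - 0).toNat = l.length := by omega
  rw [h1, h2, h3, pv_natFilter]

-- B's per-field related list is pvRel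
theorem pv_relB (fields : List String) (f : String) :
    (((PySem.List.pyRange 0 (fields.length : Int) 1).filter
          (fun j => pvCond (pvNameOf f) (pvNameOf (PySem.List.pyGetD fields j "")))).filter
        (fun j => PySem.List.pyGetD fields j "" != f)).map (fun j => PySem.List.pyGetD fields j "") =
      pvRel fields f := by
  rw [List.filter_filter]
  exact pv_indexFilter fields (fun o => (o != f) && pvCond (pvNameOf f) (pvNameOf o))


-- proof-only names for B's two index dictionaries
def pvBP (names : List String) : PySem.Dict String (List Int) :=
  (PySem.List.enumerate names).foldl (fun d p =>
    (PySem.List.pyRange 0 (PySem.Str.len p.2 + 1) 1).foldl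
      (fun d1 k => d1.modify (PySem.Str.slice p.2 none (some k)) [] (· ++ [p.1])) d)
    PySem.Dict.empty
def pvIDP (names : List String) : PySem.Dict String (List Int) :=
  (PySem.List.enumerate names).foldl (fun d p =>
    if PySem.Str.endswith p.2 "_id"
      then d.modify (PySem.Str.slice p.2 none (some (-3))) [] (· ++ [p.1]) else d)
    PySem.Dict.empty

-- a loop of 'hits.update(...)' keeps the set duplicate-free
theorem pv_setNodup (ks : List String) (D : PySem.Dict String (List Int)) (h0 : PySem.Set Int)
    (h : h0.Nodup) :
    (ks.foldl (fun h q' => PySem.Set.update h (D.getD q' [])) h0).Nodup := by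
  induction ks generalizing h0 with
  | nil => exact h
  | cons a t ih => exact ih _ (PySem.Set.nodup_update h0 _ h)

-- an existential over enumerate IS membership in a filtered range
theorem pv_enumFilter (names : List String) (C : String → Bool) (j : Int) :
    (∃ p ∈ PySem.List.enumerate names, j = p.1 ∧ C p.2 = true) ↔
    j ∈ (PySem.List.pyRange 0 (names.length : Int) 1).filter
        (fun j' => C (PySem.List.pyGetD names j' "")) := by
  rw [List.mem_filter, PySem.List.mem_pyRange_one]
  constructor
  · rintro ⟨p, hp, rfl, hC⟩
    rcases (PySem.List.mem_enumerate_iff names 0 p).mp hp with ⟨k, hk, rfl⟩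
    simp only [zero_add]
    refine ⟨⟨by positivity, by exact_mod_cast hk⟩, ?_⟩
    rw [PySem.List.pyGetD_natCast, List.getD_eq_getElem?_getD, List.getElem?_eq_getElem hk]
    simpa using hC
  · rintro ⟨⟨h0, h1⟩, hC⟩
    have hk : j.toNat < names.length := by omega
    refine ⟨(j, names[j.toNat]), ?_, rfl, ?_⟩
    · exact (PySem.List.mem_enumerate_iff names 0 _).mpr ⟨j.toNat, hk, by simp; omega⟩
    · have hj : j = ((j.toNat : Nat) : Int) := by omega
      rw [hj, PySem.List.pyGetD_natCast, List.getD_eq_getElem?_getD,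
        List.getElem?_eq_getElem hk] at hC
      simpa using hC

-- membership in B's per-field hit set is exactly A's symmetric condition
theorem pv_hitsMem (names : List String) (nm : String) (j : Int) :
    j ∈ (PySem.List.pyRange 0 (PySem.Str.len nm + 1) 1).foldl
        (fun h k => PySem.Set.update h ((pvIDP names).getD (PySem.Str.slice nm none (some k)) []))
        (if PySem.Str.endswith nm "_id"
          then PySem.Set.update PySem.Set.empty
                 ((pvBP names).getD (PySem.Str.slice nm none (some (-3))) [])
          else PySem.Set.empty) ↔
      ∃ p ∈ PySem.List.enumerate names, j = p.1 ∧ pvCond nm p.2 = true := by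
  have hfold : ∀ (h0 : PySem.Set Int),
      (PySem.List.pyRange 0 (PySem.Str.len nm + 1) 1).foldl
        (fun h k => PySem.Set.update h ((pvIDP names).getD (PySem.Str.slice nm none (some k)) [])) h0 =
      ((PySem.List.pyRange 0 (PySem.Str.len nm + 1) 1).map
          (fun k => PySem.Str.slice nm none (some k))).foldl
        (fun h q' => PySem.Set.update h ((pvIDP names).getD q' [])) h0 := by
    intro h0; rw [List.foldl_map]
  rw [hfold, pv_setUpd]
  have h2 : (∃ q' ∈ (PySem.List.pyRange 0 (PySem.Str.len nm + 1) 1).map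
        (fun k => PySem.Str.slice nm none (some k)), j ∈ (pvIDP names).getD q' []) ↔
      ∃ p ∈ PySem.List.enumerate names, j = p.1 ∧ PySem.Str.endswith p.2 "_id" = true ∧
        PySem.Str.startswith nm (PySem.Str.slice p.2 none (some (-3))) = true := by
    constructor
    · rintro ⟨q', hq', hj⟩
      rcases List.mem_map.mp hq' with ⟨k, hk, rfl⟩
      rcases (pv_idPrefix _ _ _ _).mp (by simpa [pvIDP] using hj) with h | ⟨p, hp, h1, h2, h3⟩
      · simp [PySem.Dict.getD_empty] at h
      · exact ⟨p, hp, h1, h2, (pv_prefixes nm _).mp ⟨k, hk, h3.symm⟩⟩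
    · rintro ⟨p, hp, h1, h2, h3⟩
      rcases (pv_prefixes nm _).mpr h3 with ⟨k, hk, hk2⟩
      refine ⟨PySem.Str.slice nm none (some k), List.mem_map.mpr ⟨k, hk, rfl⟩, ?_⟩
      show j ∈ (pvIDP names).getD _ []
      rw [pvIDP, pv_idPrefix]
      exact Or.inr ⟨p, hp, h1, h2, hk2.symm⟩
  rw [h2]
  by_cases he : PySem.Str.endswith nm "_id"
  · simp only [he, if_true, PySem.Set.mem_update]
    have h1 : j ∈ ((pvBP names).getD (PySem.Str.slice nm none (some (-3))) []) ↔
        ∃ p ∈ PySem.List.enumerate names, j = p.1 ∧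
          PySem.Str.startswith p.2 (PySem.Str.slice nm none (some (-3))) = true := by
      rw [pvBP, pv_byPrefix]
      simp [PySem.Dict.getD_empty]
    have hemp : ¬ j ∈ (PySem.Set.empty : PySem.Set Int) := by simp [PySem.Set.empty]
    simp only [hemp, false_or, h1]
    constructor
    · rintro (⟨p, hp, hj, hs⟩ | ⟨p, hp, hj, h2, h3⟩)
      · exact ⟨p, hp, hj, by simp only [pvCond, he, hs, Bool.true_and, Bool.true_or]⟩
      · exact ⟨p, hp, hj, by simp only [pvCond, h2, h3, Bool.true_and, Bool.or_true]⟩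
    · rintro ⟨p, hp, hj, hc⟩
      simp only [pvCond, he, Bool.true_and, Bool.or_eq_true, Bool.and_eq_true] at hc
      rcases hc with hs | ⟨h2, h3⟩
      · exact Or.inl ⟨p, hp, hj, hs⟩
      · exact Or.inr ⟨p, hp, hj, h2, h3⟩
  · have hemp : ¬ j ∈ (PySem.Set.empty : PySem.Set Int) := by simp [PySem.Set.empty]
    rw [Bool.not_eq_true] at he
    simp only [he, Bool.false_eq_true, if_false, hemp, false_or]
    constructor
    · rintro ⟨p, hp, hj, h2, h3⟩
      exact ⟨p, hp, hj, by simp only [pvCond, h2, h3, Bool.true_and, Bool.or_true]⟩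
    · rintro ⟨p, hp, hj, hc⟩
      simp only [pvCond, he, Bool.false_and, Bool.false_or, Bool.and_eq_true] at hc
      exact ⟨p, hp, hj, hc.1, hc.2⟩

-- indexing into the mapped name list is naming the indexed field
theorem pv_getD_map (fields : List String) (x : Int) (h0 : 0 ≤ x) (h1 : x < fields.length) :
    PySem.List.pyGetD (fields.map pvNameOf) x "" = pvNameOf (PySem.List.pyGetD fields x "") := by
  have hx : x = ((x.toNat : Nat) : Int) := by omega
  have hk : x.toNat < fields.length := by omega
  rw [hx, PySem.List.pyGetD_natCast, PySem.List.pyGetD_natCast,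
    List.getD_eq_getElem?_getD, List.getD_eq_getElem?_getD,
    List.getElem?_eq_getElem (by simpa using hk), List.getElem?_eq_getElem hk]
  simp

-- B's per-field related list is pvRel of the field's value
theorem pv_relB_full (fields : List String) (i : Int) (f : String)
    (hif : (i, f) ∈ PySem.List.enumerate fields) :
    (((PySem.List.sorted
        ((PySem.List.pyRange 0 (PySem.Str.len (PySem.List.pyGetD (fields.map pvNameOf) i "") + 1) 1).foldl
          (fun h k => PySem.Set.update h ((pvIDP (fields.map pvNameOf)).getD
              (PySem.Str.slice (PySem.List.pyGetD (fields.map pvNameOf) i "") none (some k)) []))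
          (if PySem.Str.endswith (PySem.List.pyGetD (fields.map pvNameOf) i "") "_id"
            then PySem.Set.update PySem.Set.empty ((pvBP (fields.map pvNameOf)).getD
                (PySem.Str.slice (PySem.List.pyGetD (fields.map pvNameOf) i "") none (some (-3))) [])
            else PySem.Set.empty))
        (fun x => x)).filter (fun j => PySem.List.pyGetD fields j "" != f)).map
      (fun j => PySem.List.pyGetD fields j "")) = pvRel fields f := by
  rcases (PySem.List.mem_enumerate_iff fields 0 (i, f)).mp hif with ⟨k, hk, hp⟩
  have hi : i = (k : Int) := by simpa using congrArg Prod.fst hp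
  have hf : f = fields[k] := by simpa using congrArg Prod.snd hp
  have hnm : PySem.List.pyGetD (fields.map pvNameOf) i "" = pvNameOf f := by
    rw [pv_getD_map fields i (by omega) (by omega)]
    congr 1
    rw [hi, PySem.List.pyGetD_natCast, List.getD_eq_getElem?_getD,
      List.getElem?_eq_getElem hk]
    simpa using hf.symm
  rw [hnm]
  have hnodup : ((PySem.List.pyRange 0 (PySem.Str.len (pvNameOf f) + 1) 1).foldl
      (fun h k => PySem.Set.update h ((pvIDP (fields.map pvNameOf)).getD
          (PySem.Str.slice (pvNameOf f) none (some k)) []))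
      (if PySem.Str.endswith (pvNameOf f) "_id"
        then PySem.Set.update PySem.Set.empty ((pvBP (fields.map pvNameOf)).getD
            (PySem.Str.slice (pvNameOf f) none (some (-3))) [])
        else PySem.Set.empty)).Nodup := by
    have hfold2 : ∀ (h0 : PySem.Set Int),
        (PySem.List.pyRange 0 (PySem.Str.len (pvNameOf f) + 1) 1).foldl
          (fun h k => PySem.Set.update h ((pvIDP (fields.map pvNameOf)).getD
              (PySem.Str.slice (pvNameOf f) none (some k)) [])) h0 =
        ((PySem.List.pyRange 0 (PySem.Str.len (pvNameOf f) + 1) 1).map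
            (fun k => PySem.Str.slice (pvNameOf f) none (some k))).foldl
          (fun h q' => PySem.Set.update h ((pvIDP (fields.map pvNameOf)).getD q' [])) h0 := by
      intro h0; rw [List.foldl_map]
    rw [hfold2]
    apply pv_setNodup
    by_cases he : PySem.Str.endswith (pvNameOf f) "_id"
    · rw [if_pos he]
      exact PySem.Set.nodup_update _ _ (by simp [PySem.Set.empty])
    · rw [if_neg he]
      simp [PySem.Set.empty]
  have hmem : ∀ j, j ∈ (PySem.List.pyRange 0 (PySem.Str.len (pvNameOf f) + 1) 1).foldl
      (fun h k => PySem.Set.update h ((pvIDP (fields.map pvNameOf)).getD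
          (PySem.Str.slice (pvNameOf f) none (some k)) []))
      (if PySem.Str.endswith (pvNameOf f) "_id"
        then PySem.Set.update PySem.Set.empty ((pvBP (fields.map pvNameOf)).getD
            (PySem.Str.slice (pvNameOf f) none (some (-3))) [])
        else PySem.Set.empty) ↔
      j ∈ (PySem.List.pyRange 0 (fields.length : Int) 1).filter
        (fun j' => pvCond (pvNameOf f) (pvNameOf (PySem.List.pyGetD fields j' ""))) := by
    intro j
    rw [pv_hitsMem, pv_enumFilter (fields.map pvNameOf) (fun s => pvCond (pvNameOf f) s) j,
      List.length_map]
    constructor <;> intro hm <;> rw [List.mem_filter] at hm ⊢ <;>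
      rcases hm with ⟨hr, hc⟩ <;> refine ⟨hr, ?_⟩ <;>
      rcases PySem.List.mem_pyRange_one.mp hr with ⟨hr0, hr1⟩
    · rw [← pv_getD_map fields j hr0 (by exact_mod_cast hr1)]; exact hc
    · rw [pv_getD_map fields j hr0 (by exact_mod_cast hr1)]; exact hc
  rw [pv_sortedFilter _ hnodup (fields.length : Int) _ hmem]
  exact pv_relB fields f

-- the common outer-loop step
def pvStep (fields : List String) (acc : PySem.Dict String (List String)) (f : String) :
    PySem.Dict String (List String) :=
  if pvRel fields f = [] then acc else acc.insert f (pvRel fields f)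

theorem pv_eq (fields : List String) :
    analyze_field_relationships fields = analyze_field_relationships_alt fields := by
  have hA : analyze_field_relationships fields =
      (fields.foldl (fun acc x => pvStep fields acc x)
        (PySem.Dict.empty : PySem.Dict String (List String))).items := by
    unfold analyze_field_relationships
    refine congrArg PySem.Dict.items ?_
    apply PySem.List.foldl_congr_mem
    intro acc x hx
    dsimp only
    rw [pv_innerA, pvStep]
  have hB : analyze_field_relationships_alt fields =
      (fields.foldl (fun acc x => pvStep fields acc x)
        (PySem.Dict.empty : PySem.Dict String (List String))).items := by
    unfold analyze_field_relationships_alt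
    dsimp only
    rw [PySem.List.foldl_prod_mk
      (f := fun (d1 : PySem.Dict String (List Int)) (inm : Int × String) =>
        (PySem.List.pyRange 0 (PySem.Str.len inm.2 + 1) 1).foldl
          (fun (d2 : PySem.Dict String (List Int)) (k : Int) =>
            d2.modify (PySem.Str.slice inm.2 none (some k)) [] (· ++ [inm.1])) d1)
      (g := fun (d2 : PySem.Dict String (List Int)) (inm : Int × String) =>
        if PySem.Str.endswith inm.2 "_id"
          then d2.modify (PySem.Str.slice inm.2 none (some (-3))) [] (· ++ [inm.1]) else d2)]
    dsimp only
    rw [show (List.foldl (fun (d1 : PySem.Dict String (List Int)) (inm : Int × String) =>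
          List.foldl (fun (d2 : PySem.Dict String (List Int)) (k : Int) =>
              d2.modify (PySem.Str.slice inm.2 none (some k)) [] (· ++ [inm.1])) d1
            (PySem.List.pyRange 0 (PySem.Str.len inm.2 + 1) 1))
          PySem.Dict.empty (PySem.List.enumerate (List.map pvNameOf fields))) =
        pvBP (fields.map pvNameOf) from rfl,
      show (List.foldl (fun (d2 : PySem.Dict String (List Int)) (inm : Int × String) =>
          if PySem.Str.endswith inm.2 "_id"
            then d2.modify (PySem.Str.slice inm.2 none (some (-3))) [] (· ++ [inm.1]) else d2)
          PySem.Dict.empty (PySem.List.enumerate (List.map pvNameOf fields))) =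
        pvIDP (fields.map pvNameOf) from rfl]
    refine congrArg PySem.Dict.items ?_
    refine Eq.trans (PySem.List.foldl_congr_mem
        (g := fun acc (p : Int × String) => pvStep fields acc p.2) _ _ _ ?_) ?_
    · intro acc p hp
      dsimp only
      rw [pv_relB_full fields p.1 p.2 (by simpa using hp), pvStep]
    · rw [← List.foldl_map (f := fun p : Int × String => p.2)
          (g := fun acc (x : String) => pvStep fields acc x),
      PySem.List.map_snd_enumerate fields 0]
  rw [hA, hB]

-- ===== VERDICT (by name: the statement is the Claim_ definition above) =====
theorem analyze_field_relationships_spec : Claim_equal_analyze_field_relationships := by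
  intro fields _
  unfold Spec_analyze_field_relationships
  exact pv_eq fields
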